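-- pv_equiv track=rewrite | github.com/carol-vasconcellos/Python_Studies | daily-studies/Day18.py | maior_palavra_por_inicial
-- ===== SOURCE A (Python) =====
-- def maior_palavra_por_inicial(lista):
--     resultado = {}
--
--     for palavra in lista:
--         inicial = palavra[0]
--         if inicial not in resultado:
--             resultado[inicial] = palavra
--         else:
--             if len(palavra) > len(resultado[inicial]):
--                 resultado[inicial] = palavra
--     return resultado
-- ===== SOURCE B (Python) =====
-- def maior_palavra_por_inicial(lista):
--     grupos = {}
--     for palavra in lista:
--         grupos.setdefault(palavra[0], []).append(palavra)
--     return {inicial: max(palavras, key=len) for inicial, palavras in grupos.items()}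
-- ===== Notes on version B (the rewrite author's own statement) =====
-- stated objective: alternative
-- what changed: A keeps a running best word per initial inside one loop; B first groups all words by initial letter into lists (one setdefault/append pass), then selects max(palavras, key=len) per group in a second pass over the items.
import Mathlib
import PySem

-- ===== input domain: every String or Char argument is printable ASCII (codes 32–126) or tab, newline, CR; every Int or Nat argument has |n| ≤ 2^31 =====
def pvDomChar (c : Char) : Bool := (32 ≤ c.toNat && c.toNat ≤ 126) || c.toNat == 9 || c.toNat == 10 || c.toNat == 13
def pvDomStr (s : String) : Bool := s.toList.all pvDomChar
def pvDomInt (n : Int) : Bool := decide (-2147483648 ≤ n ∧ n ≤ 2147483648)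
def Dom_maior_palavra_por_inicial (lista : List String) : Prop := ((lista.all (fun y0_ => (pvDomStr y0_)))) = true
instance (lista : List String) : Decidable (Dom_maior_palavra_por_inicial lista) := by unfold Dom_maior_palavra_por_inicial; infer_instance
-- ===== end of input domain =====

-- B replaces A's running-best update inside the loop by a group-then-select decomposition
-- (one grouping pass, then max(key=len) per group); objective: alternative decomposition, same cost.

-- palavra[0] as a one-character Python string (both sources index the word; total via a default,
-- used only under Pre_, which rules the empty-string IndexError out)
def pvInitial (palavra : String) : String :=
  String.ofList [((PySem.Str.pyGet? palavra 0).getD ' ')]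

-- ===== PORT A =====
def maior_palavra_por_inicial (lista : List String) : List (String × String) :=
  (lista.foldl
    (fun (resultado : PySem.Dict String String) palavra =>
      let inicial := pvInitial palavra
      if resultado.contains inicial = false then
        resultado.insert inicial palavra
      else
        if PySem.Str.len palavra > PySem.Str.len (resultado.getD inicial "") then
          resultado.insert inicial palavra
        else
          resultado)
    PySem.Dict.empty).items

-- ===== PORT B =====
-- grupos.setdefault(palavra[0], []).append(palavra) is Dict.modify with default [];
-- max(palavras, key=len) is PySem.List.max? (first extremal), total via .getD "" (groups are
-- never empty, so the default is never consulted)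
def maior_palavra_por_inicial_alt (lista : List String) : List (String × String) :=
  ((lista.foldl
      (fun (grupos : PySem.Dict String (List String)) palavra =>
        grupos.modify (pvInitial palavra) [] (fun ws => ws ++ [palavra]))
      PySem.Dict.empty).items).map
    (fun p => (p.1, (PySem.List.max? p.2 (fun w => PySem.Str.len w)).getD ""))

-- ===== PRECONDITION & SPEC =====
-- Pre_ excludes exactly the lists containing an empty string, on which Python A (and B) raise
-- IndexError at palavra[0].
def Pre_maior_palavra_por_inicial (lista : List String) : Prop := ∀ s ∈ lista, s ≠ ""
instance (lista : List String) : Decidable (Pre_maior_palavra_por_inicial lista) := by unfold Pre_maior_palavra_por_inicial; infer_instance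

def pvWitness_maior_palavra_por_inicial : List String := ["ab", "abc", "b", "ax"]

def Spec_maior_palavra_por_inicial (lista : List String) (out : List (String × String)) : Prop := out = maior_palavra_por_inicial_alt lista
instance (lista : List String) (out : List (String × String)) : Decidable (Spec_maior_palavra_por_inicial lista out) := by unfold Spec_maior_palavra_por_inicial; infer_instance

-- ===== CLAIM (what is proved, stated in full; the proofs are below) =====
def Claim_equal_maior_palavra_por_inicial : Prop := ∀ (lista : List String), Dom_maior_palavra_por_inicial lista → Pre_maior_palavra_por_inicial lista → Spec_maior_palavra_por_inicial lista (maior_palavra_por_inicial lista)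

-- ===== LEMMAS AND PROOFS =====

-- the value B selects for a group: the first word of maximal length
def pvFmax (ws : List String) : String :=
  (PySem.List.max? ws (fun w => PySem.Str.len w)).getD ""

-- the running foldl inside PySem.List.max?, named so it can be case-analysed
def pvRun (acc : Option String) (ws : List String) : Option String :=
  ws.foldl
    (fun acc x =>
      match acc with
      | none => some x
      | some m => if PySem.Str.len m < PySem.Str.len x then some x else some m)
    acc

lemma pvRun_eq_max? (ws : List String) :
    pvRun none ws = PySem.List.max? ws (fun w => PySem.Str.len w) := by
  unfold pvRun PySem.List.max?
  congr 1
  funext acc x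
  cases acc <;> rfl

lemma pvRun_append (acc : Option String) (ws : List String) (w : String) :
    pvRun acc (ws ++ [w]) =
      match pvRun acc ws with
      | none => some w
      | some m => if PySem.Str.len m < PySem.Str.len w then some w else some m := by
  have h1 : pvRun acc (ws ++ [w]) = pvRun (pvRun acc ws) [w] := by
    unfold pvRun
    rw [List.foldl_append]
  rw [h1]
  cases pvRun acc ws with
  | none => rfl
  | some m => rfl

lemma pvFmax_append (ws : List String) (w : String) :
    pvFmax (ws ++ [w]) =
      if PySem.Str.len (pvFmax ws) < PySem.Str.len w then w else pvFmax ws := by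
  unfold pvFmax
  rw [← pvRun_eq_max? ws, ← pvRun_eq_max? (ws ++ [w]), pvRun_append]
  cases pvRun none ws with
  | none =>
    simp only [Option.getD_some, Option.getD_none]
    split_ifs with hlt
    · rfl
    · have hw : w.toList.length = 0 := by
        simp [PySem.Str.len_eq] at hlt ⊢
        omega
      have hnil : w.toList = [] := List.eq_nil_of_length_eq_zero hw
      have hw0 : w = "" := by
        have h2 := congrArg String.ofList hnil
        simpa using h2
      exact hw0
  | some m =>
    simp only [Option.getD_some]
    split_ifs <;> rfl

-- loop invariant: A's running dict is B's grouping dict with each group collapsed to its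
-- first longest word
lemma pv_inv (l : List String) (res : PySem.Dict String String)
    (g : PySem.Dict String (List String))
    (hnd : g.keys.Nodup)
    (hres : res.items = g.items.map (fun p => (p.1, pvFmax p.2))) :
    (l.foldl
      (fun (resultado : PySem.Dict String String) palavra =>
        let inicial := pvInitial palavra
        if resultado.contains inicial = false then
          resultado.insert inicial palavra
        else
          if PySem.Str.len palavra > PySem.Str.len (resultado.getD inicial "") then
            resultado.insert inicial palavra
          else
            resultado)
      res).items
    = ((l.foldl
        (fun (grupos : PySem.Dict String (List String)) palavra =>
          grupos.modify (pvInitial palavra) [] (fun ws => ws ++ [palavra]))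
        g).items).map (fun p => (p.1, pvFmax p.2)) := by
  induction l generalizing res g with
  | nil => simpa using hres
  | cons w l ih =>
    simp only [List.foldl_cons]
    set k := pvInitial w with hk
    -- res and g agree on keys, hence on contains
    have hkeys : res.keys = g.keys := by
      simp [PySem.Dict.keys, hres, List.map_map, Function.comp]
    have hcont : res.contains k = g.contains k := by
      simp only [PySem.Dict.contains, hres, List.any_map]
      rfl
    cases hc : g.contains k with
    | false =>
      have hcr : res.contains k = false := by rw [hcont, hc]
      rw [PySem.Dict.modify, PySem.Dict.getD_of_not_contains g [] hc]
      simp only [hcr, if_true]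
      apply ih
      · exact PySem.Dict.nodup_keys_insert g k _ hnd
      · rw [PySem.Dict.items_insert_of_not_contains res w hcr,
            PySem.Dict.items_insert_of_not_contains g ([] ++ [w]) hc]
        simp [hres, pvFmax, PySem.List.max?]
    | true =>
      have hcr : res.contains k = true := by rw [hcont, hc]
      -- the current group at k
      have hsome : (g.get? k).isSome := by
        rw [← PySem.Dict.contains_eq_isSome_get?, hc]
      obtain ⟨ws, hws⟩ := Option.isSome_iff_exists.mp hsome
      have hgetD : g.getD k [] = ws := PySem.Dict.getD_of_get?_eq_some g [] hws
      have hmemg : (k, ws) ∈ g.items := PySem.Dict.mem_items_of_get?_eq_some g hws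
      have hndres : res.keys.Nodup := by rw [hkeys]; exact hnd
      have hmemr : (k, pvFmax ws) ∈ res.items := by
        rw [hres]
        exact List.mem_map.mpr ⟨(k, ws), hmemg, rfl⟩
      have hgetr : res.getD k "" = pvFmax ws :=
        PySem.Dict.getD_of_get?_eq_some res ""
          (PySem.Dict.get?_of_mem_items res hmemr hndres)
      -- every item of g at key k carries exactly ws
      have huniq : ∀ p ∈ g.items, (p.1 == k) = true → p.2 = ws := by
        intro p hp hpk
        have hpk' : p.1 = k := by exact eq_of_beq hpk
        have : g.get? k = some p.2 := by
          apply PySem.Dict.get?_of_mem_items g _ hnd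
          rw [← hpk']
          exact hp
        rw [hws] at this
        exact (Option.some_inj.mp this).symm
      rw [PySem.Dict.modify, hgetD]
      rw [if_neg (show ¬ (res.contains k = false) by simp [hcr])]
      rw [hgetr]
      by_cases hlt : PySem.Str.len (pvFmax ws) < PySem.Str.len w
      · rw [if_pos hlt]
        apply ih
        · exact PySem.Dict.nodup_keys_insert g k _ hnd
        · rw [PySem.Dict.items_insert_of_contains res w hcr,
              PySem.Dict.items_insert_of_contains g (ws ++ [w]) hc]
          rw [hres, List.map_map, List.map_map]
          apply List.map_congr_left
          intro p hp
          by_cases hpk : (p.1 == k) = true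
          · have hpw : p.2 = ws := huniq p hp hpk
            have hpk' : p.1 = k := eq_of_beq hpk
            simp only [Function.comp_apply, hpk', hpw, beq_self_eq_true, if_true]
            rw [pvFmax_append, if_pos hlt]
          · simp [Function.comp, hpk]
      · rw [if_neg hlt]
        apply ih
        · exact PySem.Dict.nodup_keys_insert g k _ hnd
        · rw [PySem.Dict.items_insert_of_contains g (ws ++ [w]) hc]
          rw [hres, List.map_map]
          apply List.map_congr_left
          intro p hp
          by_cases hpk : (p.1 == k) = true
          · have hpw : p.2 = ws := huniq p hp hpk
            have hpk' : p.1 = k := eq_of_beq hpk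
            simp only [Function.comp_apply, hpk', hpw, beq_self_eq_true, if_true]
            rw [pvFmax_append, if_neg hlt]
          · simp [Function.comp, hpk]

-- ===== VERDICT (by name: the statement is the Claim_ definition above) =====
theorem maior_palavra_por_inicial_spec : Claim_equal_maior_palavra_por_inicial := by
  intro lista _ _
  unfold Spec_maior_palavra_por_inicial maior_palavra_por_inicial maior_palavra_por_inicial_alt
  have := pv_inv lista PySem.Dict.empty PySem.Dict.empty
    (by exact PySem.Dict.nodup_keys_empty) (by rfl)
  simpa [pvFmax] using this
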